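-- pv_equiv track=rewrite | github.com/ClaytonBingham/Roots | roots/RepairMultifurcations.py | get_parent_children_structure
-- ===== SOURCE A (Python) =====
-- def get_parent_children_structure(tree):
-- 	'''
-- 	This method takes an swctool tree as an input and returns a dictionary which containes parent branch indexes as keys and children branches as values
-- 	'''
-- 	structure = dict()
-- 	for branch in tree.keys():
-- 		structure[branch] = []
-- 		if branch == 0:
-- 			continue
--
-- 		else:
-- 			for b in list(tree.keys())[:branch]:
-- 				if tree[branch][0] == tree[b][-1]:
-- 					structure[b].append(branch)
--
-- 	return(structure)
-- ===== SOURCE B (Python) =====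
-- def get_parent_children_structure(tree):
-- 	'''
-- 	This method takes an swctool tree as an input and returns a dictionary which containes parent branch indexes as keys and children branches as values
-- 	'''
-- 	structure = {branch: [] for branch in tree}
-- 	by_end = {}
-- 	for pos, points in enumerate(tree.values()):
-- 		by_end.setdefault(points[-1], []).append(pos)
-- 	keys = list(tree)
-- 	for branch, points in tree.items():
-- 		if branch == 0:
-- 			continue
-- 		for pos in by_end.get(points[0], []):
-- 			if pos >= branch:
-- 				break
-- 			structure[keys[pos]].append(branch)
-- 	return structure
-- ===== Notes on version B (the rewrite author's own statement) =====
-- stated objective: faster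
-- what changed: Replaces the per-branch rescan of the key-list prefix by an endpoint-to-positions dictionary built once, so each branch finds its parents with a single lookup; Pre_ excludes duplicate keys (impossible in the Python dict the list models), trees where A raises KeyError (a start point matching a later-listed branch's endpoint), and branches with an empty point list (A raises IndexError wherever it indexes one, and B always does).
-- intended difference: On branches with a NEGATIVE id, A wraps the id like a Python slice bound (list(tree.keys())[:id]) and attaches the branch as a child of matching branches among the first n+id, while B attaches a negative-id branch to no parent, the intended reading of ids that index branches (no branch is listed before a negative id). — e.g. on get_parent_children_structure([(0, [1]), (-1, [1, 1])]): A returns [(0, [-1]), (-1, [])], B returns [(0, []), (-1, [])]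
-- outside the precondition, e.g. on get_parent_children_structure({0: []}): A returns {0: []}, B raises IndexError
import Mathlib
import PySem

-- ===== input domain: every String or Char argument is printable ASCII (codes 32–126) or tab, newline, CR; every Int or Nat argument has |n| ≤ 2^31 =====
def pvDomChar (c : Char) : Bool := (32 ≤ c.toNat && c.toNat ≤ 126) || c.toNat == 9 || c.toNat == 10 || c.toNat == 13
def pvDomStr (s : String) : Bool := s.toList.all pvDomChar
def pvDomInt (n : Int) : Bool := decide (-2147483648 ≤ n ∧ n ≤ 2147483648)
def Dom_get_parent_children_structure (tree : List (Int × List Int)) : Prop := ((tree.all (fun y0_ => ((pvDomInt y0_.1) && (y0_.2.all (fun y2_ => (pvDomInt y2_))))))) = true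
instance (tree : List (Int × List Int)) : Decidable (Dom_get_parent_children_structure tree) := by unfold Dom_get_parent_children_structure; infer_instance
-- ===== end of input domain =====

-- B indexes branch endpoints in a dictionary built in one pass, so a branch finds its parents
-- with one lookup instead of rescanning all earlier branches (objective: faster); on the
-- exceptional NEGATIVE branch ids, which A wraps like a Python slice bound, B instead attaches
-- no parents (see D_ below).

-- ===== PORT A =====
-- dict lookup tree[k] (first match; [] where Python would raise KeyError, which Pre_ excludes)
def pvLookup (tree : List (Int × List Int)) (k : Int) : List Int :=
  (PySem.Dict.mk tree).getD k []

-- literal transliteration of A: for each branch, insert an empty child list, then scan the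
-- key-list prefix keys[:branch] and append `branch` to every earlier branch whose endpoint
-- equals this branch's start point.  tree[branch][0] / tree[b][-1] are pyGet?; on inputs where
-- Python raises (empty value list, append to a not-yet-inserted key) Pre_ is false and the
-- total defaults ([] lookup, Option ==, modify-inserts) are never compared.
def get_parent_children_structure (tree : List (Int × List Int)) : List (Int × List Int) :=
  let keys := tree.map (fun p => p.1)
  let stOut :=
    keys.foldl (fun st branch =>
      let st1 := st.insert branch ([] : List Int)
      if branch == 0 then st1
      else
        (PySem.List.slice keys none (some branch)).foldl (fun st2 b =>
          if PySem.List.pyGet? (pvLookup tree branch) 0 == PySem.List.pyGet? (pvLookup tree b) (-1)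
          then st2.modify b [] (fun c => c ++ [branch])
          else st2) st1) PySem.Dict.empty
  stOut.items

-- ===== PORT B =====
-- literal transliteration of B (Source B): by_end maps an endpoint to the (ascending) positions of
-- the branches ending there, built in one enumerate pass; each branch appends itself to the rows
-- of by_end.get(points[0], []), stopping at positions ≥ its id (`if pos >= branch: break` is the
-- takeWhile).  points[0] / points[-1] are ported as (pyGet? …).getD 0, exact on Pre_ (every
-- point list nonempty; on an empty list Source B raises IndexError, outside Pre_).
def get_parent_children_structure_alt (tree : List (Int × List Int)) : List (Int × List Int) :=
  let structure0 : PySem.Dict Int (List Int) :=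
    tree.foldl (fun d p => d.insert p.1 ([] : List Int)) PySem.Dict.empty
  let byEnd : PySem.Dict Int (List Int) :=
    (PySem.List.enumerate (tree.map (fun p => p.2))).foldl
      (fun d q => d.modify ((PySem.List.pyGet? q.2 (-1)).getD 0) [] (fun l => l ++ [q.1]))
      PySem.Dict.empty
  let keys := tree.map (fun p => p.1)
  let final :=
    tree.foldl (fun d p =>
      if p.1 == 0 then d
      else
        ((byEnd.getD ((PySem.List.pyGet? p.2 0).getD 0) []).takeWhile
            (fun pos => decide (pos < p.1))).foldl
          (fun d2 pos => d2.modify (PySem.List.pyGetD keys pos 0) [] (fun c => c ++ [p.1])) d)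
      structure0
  final.items

-- ===== PRECONDITION & SPEC =====
def pvKey (tree : List (Int × List Int)) (i : Nat) : Int := (tree.getD i (0, [])).1
def pvVal (tree : List (Int × List Int)) (i : Nat) : List Int := (tree.getD i (0, [])).2
-- the number of keys Python's  list(tree.keys())[:branch]  keeps (unclamped above)
def pvBnd (n : Nat) (k : Int) : Nat := if k < 0 then ((n : Int) + k).toNat else k.toNat

-- Pre_ excludes duplicate keys (they cannot occur in a Python dict, whose key set the
-- association list models) and exactly the inputs where A or B raises: an empty point list
-- (A raises IndexError on tree[branch][0]/tree[b][-1] wherever it reaches one, B on points[-1]),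
-- and a branch whose start point matches the endpoint of a key placed LATER in the scanned
-- prefix, which A appends to before inserting it (KeyError).
def Pre_get_parent_children_structure (tree : List (Int × List Int)) : Prop :=
  (tree.map (fun p => p.1)).Nodup ∧
  (∀ i < tree.length, pvVal tree i ≠ []) ∧
  (∀ j < tree.length, pvKey tree j ≠ 0 →
    ∀ i < tree.length, i < pvBnd tree.length (pvKey tree j) →
      PySem.List.pyGet? (pvVal tree j) 0 = PySem.List.pyGet? (pvVal tree i) (-1) → i ≤ j)
instance (tree : List (Int × List Int)) : Decidable (Pre_get_parent_children_structure tree) := by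
  unfold Pre_get_parent_children_structure; infer_instance

def pvWitness_get_parent_children_structure : (List (Int × List Int)) :=
  [(0, [1]), (1, [1, 2]), (2, [2, 3])]

-- On branches with a NEGATIVE id (meaningless for an swc tree), A wraps the id like a Python
-- slice bound, list(tree.keys())[:id], and so attaches the branch as a child of the matching
-- branches among the first n+id; B attaches a negative-id branch to no parent, the intended
-- reading of ids that index branches (no branch is listed before a negative id).
def D_get_parent_children_structure (tree : List (Int × List Int)) : Prop :=
  ∃ p ∈ tree.zipIdx, p.1.1 < 0 ∧
    ∃ q ∈ tree.zipIdx,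
      PySem.List.pyGet? p.1.2 0 = PySem.List.pyGet? q.1.2 (-1) ∧
      (q.2 : Int) < (tree.length : Int) + p.1.1
instance (tree : List (Int × List Int)) : Decidable (D_get_parent_children_structure tree) := by
  unfold D_get_parent_children_structure; infer_instance

def Spec_get_parent_children_structure (tree : List (Int × List Int)) (out : List (Int × List Int)) : Prop := ¬ D_get_parent_children_structure tree → out = get_parent_children_structure_alt tree
instance (tree : List (Int × List Int)) (out : List (Int × List Int)) : Decidable (Spec_get_parent_children_structure tree out) := by unfold Spec_get_parent_children_structure; infer_instance

def pvDiffWitness_get_parent_children_structure : (List (Int × List Int)) :=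
  [(0, [1]), (-1, [1, 1])]
def pvDiffWitnessOut_get_parent_children_structure : (List (Int × List Int)) × (List (Int × List Int)) :=
  ([(0, [-1]), (-1, [])], [(0, []), (-1, [])])

-- ===== CLAIM (what is proved, stated in full; the proofs are below) =====
def Claim_unchanged_get_parent_children_structure : Prop := ∀ (tree : List (Int × List Int)), Dom_get_parent_children_structure tree → Pre_get_parent_children_structure tree → Spec_get_parent_children_structure tree (get_parent_children_structure tree)
def Claim_changed_get_parent_children_structure : Prop := Dom_get_parent_children_structure (pvDiffWitness_get_parent_children_structure) ∧ Pre_get_parent_children_structure (pvDiffWitness_get_parent_children_structure) ∧ D_get_parent_children_structure (pvDiffWitness_get_parent_children_structure) ∧ get_parent_children_structure (pvDiffWitness_get_parent_children_structure) = pvDiffWitnessOut_get_parent_children_structure.1 ∧ get_parent_children_structure_alt (pvDiffWitness_get_parent_children_structure) = pvDiffWitnessOut_get_parent_children_structure.2 ∧ pvDiffWitnessOut_get_parent_children_structure.1 ≠ pvDiffWitnessOut_get_parent_children_structure.2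
def Claim_exact_get_parent_children_structure : Prop := ∀ (tree : List (Int × List Int)), Dom_get_parent_children_structure tree → Pre_get_parent_children_structure tree → D_get_parent_children_structure tree → get_parent_children_structure tree ≠ get_parent_children_structure_alt tree

-- ===== LEMMAS AND PROOFS =====

-- the slice bound of pvBnd, as the Int comparison D_ states
theorem pv_bnd_iff (n i : Nat) (k : Int) :
    i < pvBnd n k ↔ (i : Int) < (if k < 0 then (n : Int) + k else k) := by
  unfold pvBnd
  split_ifs <;> omega

-- D_ read back through positions
theorem pv_D_iff (tree : List (Int × List Int)) :
    D_get_parent_children_structure tree ↔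
    ∃ j < tree.length, pvKey tree j < 0 ∧ ∃ i < tree.length,
      PySem.List.pyGet? (pvVal tree j) 0 = PySem.List.pyGet? (pvVal tree i) (-1) ∧
      (i : Int) < (tree.length : Int) + pvKey tree j := by
  unfold D_get_parent_children_structure
  constructor
  · rintro ⟨p, hp, hz, q, hq, hm, hx⟩
    rw [List.mem_zipIdx_iff_getElem?] at hp hq
    obtain ⟨hpl, hpe⟩ := List.getElem?_eq_some_iff.mp hp
    obtain ⟨hql, hqe⟩ := List.getElem?_eq_some_iff.mp hq
    have hkp : pvKey tree p.2 = p.1.1 := by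
      unfold pvKey; rw [List.getD_eq_getElem _ _ hpl, hpe]
    have hvp : pvVal tree p.2 = p.1.2 := by
      unfold pvVal; rw [List.getD_eq_getElem _ _ hpl, hpe]
    have hvq : pvVal tree q.2 = q.1.2 := by
      unfold pvVal; rw [List.getD_eq_getElem _ _ hql, hqe]
    exact ⟨p.2, hpl, by rw [hkp]; exact hz, q.2, hql, by rw [hvp, hvq]; exact hm,
      by rw [hkp]; exact hx⟩
  · rintro ⟨j, hj, hz, i, hi, hm, hx⟩
    have hk : tree[j].1 = pvKey tree j := by
      unfold pvKey; rw [List.getD_eq_getElem _ _ hj]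
    have hvj : tree[j].2 = pvVal tree j := by
      unfold pvVal; rw [List.getD_eq_getElem _ _ hj]
    have hvi : tree[i].2 = pvVal tree i := by
      unfold pvVal; rw [List.getD_eq_getElem _ _ hi]
    refine ⟨(tree[j], j), List.mem_zipIdx_iff_getElem?.mpr (List.getElem?_eq_getElem hj),
      by rw [hk]; exact hz,
      (tree[i], i), List.mem_zipIdx_iff_getElem?.mpr (List.getElem?_eq_getElem hi),
      by rw [hvj, hvi]; exact hm, by rw [hk]; exact hx⟩

-- A's test for branch at position j against the earlier branch at position i
def pvCond (tree : List (Int × List Int)) (i j : Nat) : Bool :=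
  pvKey tree j != 0 && decide (i < pvBnd tree.length (pvKey tree j)) &&
  (PySem.List.pyGet? (pvVal tree j) 0 == PySem.List.pyGet? (pvVal tree i) (-1))

-- B's test: the appender j must actually precede… i.e. i < j, endpoints compared by default value
def pvCondB (tree : List (Int × List Int)) (i j : Nat) : Bool :=
  pvKey tree j != 0 && decide ((i : Int) < pvKey tree j) &&
  ((pvVal tree i).getLastD 0 == (pvVal tree j).headD 0)

def pvNF (tree : List (Int × List Int)) : List (Int × List Int) :=
  (List.range tree.length).map (fun i =>
    (pvKey tree i, ((List.range tree.length).filter (fun j => pvCond tree i j)).map (pvKey tree)))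

def pvNFB (tree : List (Int × List Int)) : List (Int × List Int) :=
  (List.range tree.length).map (fun i =>
    (pvKey tree i, ((List.range tree.length).filter (fun j => pvCondB tree i j)).map (pvKey tree)))

-- ---- small utilities ----

theorem pv_pyGet_zero (v : List Int) (h : v ≠ []) :
    PySem.List.pyGet? v 0 = some (v.headD 0) := by
  have hl : 0 < v.length := List.length_pos_iff.mpr h
  simp only [PySem.List.pyGet?, PySem.List.pyIdx?]
  rw [if_pos le_rfl, if_pos (by omega)]
  cases v with
  | nil => simp at h
  | cons a t => rfl

theorem pv_pyGet_neg_one (v : List Int) (h : v ≠ []) :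
    PySem.List.pyGet? v (-1) = some (v.getLastD 0) := by
  have hl : 0 < v.length := List.length_pos_iff.mpr h
  simp only [PySem.List.pyGet?, PySem.List.pyIdx?]
  rw [if_neg (by omega), if_pos (by omega)]
  have h1 : (-(-1 : Int)).toNat = 1 := rfl
  rw [h1, List.getLastD_eq_getLast?, List.getLast?_eq_getElem?]
  simp [List.getElem?_eq_getElem (by omega : v.length - 1 < v.length)]

theorem pv_pyGetD_zero (v : List Int) : (PySem.List.pyGet? v 0).getD 0 = v.headD 0 := by
  by_cases h : v = []
  · subst h; rfl
  · rw [pv_pyGet_zero v h]; rfl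

theorem pv_pyGetD_neg_one (v : List Int) : (PySem.List.pyGet? v (-1)).getD 0 = v.getLastD 0 := by
  by_cases h : v = []
  · subst h; rfl
  · rw [pv_pyGet_neg_one v h]; rfl

-- keys and values at a position
theorem pv_key_eq (tree : List (Int × List Int)) (i : Nat) (hi : i < tree.length) :
    pvKey tree i = (tree.map (fun p => p.1)).getD i 0 := by
  show (tree.getD i (0, [])).1 = _
  rw [List.getD_eq_getElem _ _ hi,
    List.getD_eq_getElem _ _ (by simpa using hi : i < (tree.map (fun p => p.1)).length),
    List.getElem_map]

theorem pv_keys_eq_map_range (tree : List (Int × List Int)) :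
    tree.map (fun p => p.1) = (List.range tree.length).map (pvKey tree) := by
  apply List.ext_getElem
  · simp
  · intro i h1 h2
    simp only [List.getElem_map, List.getElem_range]
    rw [pv_key_eq tree i (by simpa using h1), List.getD_eq_getElem _ _ h1, List.getElem_map]

theorem pv_key_inj (tree : List (Int × List Int)) (hnd : (tree.map (fun p => p.1)).Nodup)
    {i j : Nat} (hi : i < tree.length) (hj : j < tree.length)
    (h : pvKey tree i = pvKey tree j) : i = j := by
  have hi' : i < (tree.map (fun p => p.1)).length := by simpa using hi
  have hj' : j < (tree.map (fun p => p.1)).length := by simpa using hj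
  refine (List.Nodup.getElem_inj_iff hnd (hi := hi') (hj := hj')).mp ?_
  rw [← List.getD_eq_getElem _ 0 hi', ← List.getD_eq_getElem _ 0 hj']
  rw [← pv_key_eq tree i hi, ← pv_key_eq tree j hj]; exact h

theorem pv_mem_take (tree : List (Int × List Int)) (hnd : (tree.map (fun p => p.1)).Nodup)
    {i : Nat} (hi : i < tree.length) (t : Nat) :
    pvKey tree i ∈ (tree.map (fun p => p.1)).take t ↔ i < t := by
  constructor
  · intro hmem
    obtain ⟨m, hm, he⟩ := List.getElem_of_mem hmem
    have hm1 : m < t := by have := hm; simp at this; omega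
    have hm2 : m < tree.length := by have := hm; simp at this; omega
    rw [List.getElem_take] at he
    have : pvKey tree m = pvKey tree i := by
      rw [pv_key_eq tree m hm2, List.getD_eq_getElem _ _ (by simpa using hm2)]; exact he
    rw [← pv_key_inj tree hnd hm2 hi this]; exact hm1
  · intro hit
    have : pvKey tree i = ((tree.map (fun p => p.1)).take t)[i]'(by simp; omega) := by
      rw [List.getElem_take, pv_key_eq tree i hi, List.getD_eq_getElem _ _ (by simpa using hi)]
    rw [this]; exact List.getElem_mem _

-- dict lookup tree[key i] is the value at position i
theorem pv_lookup_eq (tree : List (Int × List Int)) (hnd : (tree.map (fun p => p.1)).Nodup)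
    (i : Nat) (hi : i < tree.length) : pvLookup tree (pvKey tree i) = pvVal tree i := by
  have hmem : (pvKey tree i, pvVal tree i) ∈ (PySem.Dict.mk tree).items := by
    have h0 : (pvKey tree i, pvVal tree i) = tree[i] := by
      show (_, _) = _
      rw [pvKey, pvVal, List.getD_eq_getElem _ _ hi]
    rw [h0]
    exact List.getElem_mem _
  unfold pvLookup
  exact PySem.Dict.getD_of_mem_items _ hmem hnd []

-- the slice keys[:k] is a take of pvBnd
theorem pv_slice_eq_take (keys : List Int) (k : Int) :
    PySem.List.slice keys none (some k) = keys.take (pvBnd keys.length k) := by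
  unfold pvBnd
  simp only [PySem.List.slice, PySem.List.clampIdx]
  by_cases hk : k < 0
  · rw [if_pos hk, if_pos hk]
    by_cases h2 : (keys.length : Int) + k < 0
    · rw [if_pos h2]
      have : ((keys.length : Int) + k).toNat = 0 := by omega
      simp [this]
    · rw [if_neg h2]; simp
  · rw [if_neg hk, if_neg hk]
    simp [List.take_eq_take_min.symm]

-- dict.modify is an insert of the adjusted value
theorem pv_modify_eq_insert (d : PySem.Dict Int (List Int)) (k : Int) (f : List Int → List Int) :
    d.modify k [] f = d.insert k (f (d.getD k [])) := rfl

-- appending x to the rows named by bs (a conditional modify loop), at the items level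
theorem pv_fold_modify_items (x : Int) (q : Int → Bool) (bs : List Int)
    (d : PySem.Dict Int (List Int)) (hnd : d.keys.Nodup) (hbs : bs.Nodup)
    (hq : ∀ b ∈ bs, q b = true → d.contains b = true) :
    (bs.foldl (fun st b => if q b then st.modify b [] (fun c => c ++ [x]) else st) d).items
      = d.items.map (fun p => if p.1 ∈ bs ∧ q p.1 = true then (p.1, p.2 ++ [x]) else p) := by
  induction bs generalizing d with
  | nil => simp
  | cons b bs ih =>
    have hbnotin : b ∉ bs := (List.nodup_cons.mp hbs).1
    rw [List.foldl_cons]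
    set d1 := (if q b then d.modify b [] (fun c => c ++ [x]) else d) with hd1
    have hitems1 : d1.items = d.items.map (fun p => if p.1 = b ∧ q p.1 = true then (p.1, p.2 ++ [x]) else p) := by
      rw [hd1]
      by_cases hqb : q b = true
      · rw [if_pos hqb, pv_modify_eq_insert,
          PySem.Dict.items_insert_of_contains _ _ (hq b (List.mem_cons_self) hqb)]
        apply List.map_congr_left
        intro p hp
        by_cases hpb : p.1 = b
        · have hbp : (b, p.2) ∈ d.items := by rw [← hpb]; simpa using hp
          rw [if_pos (by simpa using hpb), if_pos ⟨hpb, hpb ▸ hqb⟩,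
            PySem.Dict.getD_of_mem_items d hbp hnd []]
          rw [hpb]
        · rw [if_neg (by simpa using hpb), if_neg (by tauto)]
      · rw [if_neg hqb]
        have h0 : ∀ p ∈ d.items, (if p.1 = b ∧ q p.1 = true then (p.1, p.2 ++ [x]) else p) = p := by
          intro p _
          rw [if_neg]
          rintro ⟨h1, h2⟩
          exact hqb (h1 ▸ h2)
        rw [List.map_congr_left h0]
        simp
    have hkeys1 : d1.keys = d.keys := by
      rw [hd1]
      by_cases hqb : q b = true
      · rw [if_pos hqb, PySem.Dict.keys_modify, PySem.Dict.keys_insert_of_contains]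
        exact hq b (List.mem_cons_self) hqb
      · rw [if_neg hqb]
    rw [ih d1 (hkeys1 ▸ hnd) (List.nodup_cons.mp hbs).2
      (fun b' hb' hq' => by
        rw [PySem.Dict.contains_iff_mem_keys, hkeys1, ← PySem.Dict.contains_iff_mem_keys]
        exact hq b' (List.mem_cons_of_mem _ hb') hq'),
      hitems1, List.map_map]
    apply List.map_congr_left
    intro p hp
    simp only [Function.comp_apply, List.mem_cons]
    by_cases hpb : p.1 = b
    · by_cases hqp : q p.1 = true
      · have hqb : q b = true := hpb ▸ hqp
        simp [hpb, hqb, hbnotin]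
      · have hqb : ¬ q b = true := fun h => hqp (hpb ▸ h)
        simp [hpb, hqb]
    · by_cases hqp : q p.1 = true
      · simp [hpb, hqp]
      · simp [hpb, hqp]

-- the unconditional modify loop (B's inner loop)
theorem pv_fold_modify_items_all (x : Int) (bs : List Int)
    (d : PySem.Dict Int (List Int)) (hnd : d.keys.Nodup) (hbs : bs.Nodup)
    (hq : ∀ b ∈ bs, d.contains b = true) :
    (bs.foldl (fun st b => st.modify b [] (fun c => c ++ [x])) d).items
      = d.items.map (fun p => if p.1 ∈ bs then (p.1, p.2 ++ [x]) else p) := by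
  have h1 : (bs.foldl (fun st b => st.modify b [] (fun c => c ++ [x])) d)
      = (bs.foldl (fun st b => if (fun (_ : Int) => true) b then st.modify b [] (fun c => c ++ [x]) else st) d) := by
    exact PySem.List.foldl_congr_mem bs
      (fun st b => st.modify b [] (fun c => c ++ [x]))
      (fun st b => if (fun (_ : Int) => true) b then st.modify b [] (fun c => c ++ [x]) else st)
      d (fun acc b _ => rfl)
  rw [h1, pv_fold_modify_items x (fun _ => true) bs d hnd hbs (fun b hb _ => hq b hb)]
  simp

-- under Pre_, a match never points forward
theorem pv_cond_le (tree : List (Int × List Int))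
    (hpre : Pre_get_parent_children_structure tree) {i j : Nat}
    (hi : i < tree.length) (hj : j < tree.length)
    (hc : pvCond tree i j = true) : i ≤ j := by
  unfold pvCond at hc
  simp only [Bool.and_eq_true, bne_iff_ne, decide_eq_true_eq, beq_iff_eq] at hc
  exact hpre.2.2 j hj hc.1.1 i hi hc.1.2 hc.2

theorem pv_range_map_key_eq_take (tree : List (Int × List Int)) {m : Nat} (hm : m ≤ tree.length) :
    (List.range m).map (pvKey tree) = (tree.map (fun p => p.1)).take m := by
  rw [pv_keys_eq_map_range, ← List.map_take, List.take_range, min_eq_left hm]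

theorem pv_range_map_key_nodup (tree : List (Int × List Int))
    (hnd : (tree.map (fun p => p.1)).Nodup) {m : Nat} (hm : m ≤ tree.length) :
    ((List.range m).map (pvKey tree)).Nodup := by
  rw [pv_range_map_key_eq_take tree hm]
  exact hnd.sublist (List.take_sublist _ _)

theorem pv_filter_range_succ (tree : List (Int × List Int)) (q : Nat → Bool) (m : Nat) :
    ((List.range m ++ [m]).filter q).map (pvKey tree)
      = ((List.range m).filter q).map (pvKey tree)
        ++ (if q m then [pvKey tree m] else []) := by
  rw [List.filter_append, List.map_append]
  congr 1
  by_cases h : q m <;> simp [h]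

theorem pv_row_self_nil (tree : List (Int × List Int))
    (hpre : Pre_get_parent_children_structure tree) {m : Nat} (hm : m < tree.length) :
    (List.range m).filter (fun j => pvCond tree m j) = [] := by
  rw [List.filter_eq_nil_iff]
  intro j hj
  rw [List.mem_range] at hj
  intro hc
  exact absurd (pv_cond_le tree hpre hm (by omega) hc) (by omega)

-- the A-side loop invariant
theorem pv_A_inv (tree : List (Int × List Int))
    (hpre : Pre_get_parent_children_structure tree) :
    ∀ m, m ≤ tree.length →
    ((((tree.map (fun p => p.1)).take m).foldl
      (fun st branch =>
        let st1 := st.insert branch ([] : List Int)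
        if branch == 0 then st1
        else (PySem.List.slice (tree.map (fun p => p.1)) none (some branch)).foldl
          (fun st2 b => if PySem.List.pyGet? (pvLookup tree branch) 0 == PySem.List.pyGet? (pvLookup tree b) (-1)
            then st2.modify b [] (fun c => c ++ [branch]) else st2) st1)
      PySem.Dict.empty).items)
    = (List.range m).map (fun i =>
        (pvKey tree i, ((List.range m).filter (fun j => pvCond tree i j)).map (pvKey tree))) := by
  intro m
  induction m with
  | zero => intro _; rfl
  | succ m ih =>
    intro hm1
    have hmn : m < tree.length := by omega
    have hnd := hpre.1
    rw [List.take_succ_eq_append_getElem (by simpa using hmn), List.foldl_append,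
      List.foldl_cons, List.foldl_nil]
    set st := (((tree.map (fun p => p.1)).take m).foldl _ PySem.Dict.empty) with hst
    have hitems := ih (by omega)
    have hkeym : (tree.map (fun p => p.1))[m]'(by simpa using hmn) = pvKey tree m := by
      rw [List.getElem_map]
      show tree[m].1 = (tree.getD m (0, [])).1
      rw [List.getD_eq_getElem _ _ hmn]
    have hkeys : st.keys = (List.range m).map (pvKey tree) := by
      show st.items.map (fun p => p.1) = _
      rw [hitems, List.map_map]
      rfl
    have hnotin : pvKey tree m ∉ st.keys := by
      rw [hkeys]
      intro hmem
      obtain ⟨i, hi, he⟩ := List.mem_map.mp hmem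
      rw [List.mem_range] at hi
      have := pv_key_inj tree hnd (by omega) hmn he
      omega
    have hcontainsF : st.contains (pvKey tree m) = false := by
      rw [Bool.eq_false_iff]
      intro h
      exact hnotin ((PySem.Dict.contains_iff_mem_keys st _).mp h)
    have hitems1 : (st.insert (pvKey tree m) ([] : List Int)).items
        = st.items ++ [(pvKey tree m, [])] :=
      PySem.Dict.items_insert_of_not_contains st _ hcontainsF
    rw [hkeym]
    dsimp only
    by_cases hz : pvKey tree m = 0
    · rw [if_pos (by simpa using hz)]
      have hcondm : ∀ i, pvCond tree i m = false := by
        intro i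
        unfold pvCond
        simp [hz]
      rw [hitems1, hitems, List.range_succ, List.map_append]
      congr 1
      · apply List.map_congr_left
        intro i _
        rw [pv_filter_range_succ, hcondm i]
        simp
      · have hrow : ((List.range m ++ [m]).filter (fun j => pvCond tree m j)).map (pvKey tree) = [] := by
          rw [pv_filter_range_succ, hcondm m, pv_row_self_nil tree hpre hmn]
          simp
        simp only [List.map_cons, List.map_nil, hrow]
    · rw [if_neg (by simpa using hz)]
      rw [pv_slice_eq_take]
      simp only [List.length_map]
      set B := pvBnd tree.length (pvKey tree m) with hB
      have hkeys1 : (st.insert (pvKey tree m) ([] : List Int)).keys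
          = (List.range (m+1)).map (pvKey tree) := by
        show (st.insert (pvKey tree m) ([] : List Int)).items.map (fun p => p.1) = _
        rw [hitems1, List.map_append, hitems, List.map_map, List.range_succ, List.map_append]
        rfl
      have hnd1 : (st.insert (pvKey tree m) ([] : List Int)).keys.Nodup := by
        rw [hkeys1]
        exact pv_range_map_key_nodup tree hnd (by omega)
      have hbs : ((tree.map (fun p => p.1)).take B).Nodup :=
        hnd.sublist (List.take_sublist _ _)
      -- the Bool test A evaluates for b, as a function of the position
      have hq_iff : ∀ i, i < tree.length →
          ((PySem.List.pyGet? (pvLookup tree (pvKey tree m)) 0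
            == PySem.List.pyGet? (pvLookup tree (pvKey tree i)) (-1)) = true
           ↔ PySem.List.pyGet? (pvVal tree m) 0 = PySem.List.pyGet? (pvVal tree i) (-1)) := by
        intro i hi
        rw [pv_lookup_eq tree hnd m hmn, pv_lookup_eq tree hnd i hi, beq_iff_eq]
      have hcond_iff : ∀ i, i < tree.length →
          ((pvKey tree i ∈ (tree.map (fun p => p.1)).take B ∧
            (PySem.List.pyGet? (pvLookup tree (pvKey tree m)) 0
              == PySem.List.pyGet? (pvLookup tree (pvKey tree i)) (-1)) = true)
           ↔ pvCond tree i m = true) := by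
        intro i hi
        unfold pvCond
        rw [pv_mem_take tree hnd hi B, hq_iff i hi]
        simp only [Bool.and_eq_true, bne_iff_ne, decide_eq_true_eq, beq_iff_eq, ← hB]
        tauto
      have hq : ∀ b ∈ (tree.map (fun p => p.1)).take B,
          (PySem.List.pyGet? (pvLookup tree (pvKey tree m)) 0
            == PySem.List.pyGet? (pvLookup tree b) (-1)) = true →
          (st.insert (pvKey tree m) ([] : List Int)).contains b = true := by
        intro b hb hqb
        obtain ⟨i, hi, he⟩ := List.getElem_of_mem hb
        have hiB : i < B := by simp at hi; omega
        have hin : i < tree.length := by simp at hi; omega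
        have hbkey : b = pvKey tree i := by
          rw [← he, List.getElem_take, List.getElem_map]
          show tree[i].1 = (tree.getD i (0, [])).1
          rw [List.getD_eq_getElem _ _ hin]
        rw [hbkey] at hqb
        have hle : i ≤ m :=
          hpre.2.2 m hmn hz i hin hiB ((hq_iff i hin).mp hqb)
        rw [PySem.Dict.contains_iff_mem_keys, hkeys1]
        exact List.mem_map.mpr ⟨i, List.mem_range.mpr (by omega), hbkey.symm⟩
      rw [pv_fold_modify_items (pvKey tree m)
        (fun b => PySem.List.pyGet? (pvLookup tree (pvKey tree m)) 0
          == PySem.List.pyGet? (pvLookup tree b) (-1))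
        ((tree.map (fun p => p.1)).take B)
        (st.insert (pvKey tree m) ([] : List Int)) hnd1 hbs hq]
      rw [hitems1, List.map_append, hitems, List.map_map, List.range_succ, List.map_append]
      congr 1
      · apply List.map_congr_left
        intro i hi
        rw [List.mem_range] at hi
        simp only [Function.comp_apply]
        rw [pv_filter_range_succ]
        by_cases hc : pvCond tree i m = true
        · rw [if_pos ((hcond_iff i (by omega)).mpr hc), if_pos hc]
        · rw [if_neg (fun h => hc ((hcond_iff i (by omega)).mp h)), if_neg hc]
          simp
      · simp only [List.map_cons, List.map_nil]
        rw [pv_filter_range_succ, pv_row_self_nil tree hpre hmn]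
        by_cases hc : pvCond tree m m = true
        · rw [if_pos ((hcond_iff m hmn).mpr hc), if_pos hc]
          simp
        · rw [if_neg (fun h => hc ((hcond_iff m hmn).mp h)), if_neg hc]
          simp

theorem pv_A_eq_NF (tree : List (Int × List Int))
    (h : Pre_get_parent_children_structure tree) :
    get_parent_children_structure tree = pvNF tree := by
  have h0 := pv_A_inv tree h tree.length le_rfl
  have h1 : (tree.map (fun p => p.1)).take tree.length = tree.map (fun p => p.1) := by simp
  rw [h1] at h0
  exact h0

-- the initial children dict of B
theorem pv_children_items (tree : List (Int × List Int))
    (hnd : (tree.map (fun p => p.1)).Nodup) :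
    ((tree.map (fun p => p.1)).foldl (fun d k => d.insert k ([] : List Int)) PySem.Dict.empty).items
      = (List.range tree.length).map (fun i => (pvKey tree i, ([] : List Int))) := by
  rw [PySem.Dict.items_foldl_insert_fresh (tree.map (fun p => p.1)) (fun x => x)
    (fun _ => ([] : List Int)) PySem.Dict.empty
    (fun a _ => PySem.Dict.contains_empty a) (by simpa using hnd)]
  rw [show PySem.Dict.empty.items = ([] : List (Int × List Int)) from rfl,
    List.nil_append, pv_keys_eq_map_range, List.map_map]
  rfl

-- Python's enumerate, positionally
theorem pv_enumerate {α : Type} (d : α) (xs : List α) :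
    ∀ start : Int, PySem.List.enumerate xs start
      = (List.range xs.length).map (fun (i : Nat) => (start + (i : Int), xs.getD i d)) := by
  induction xs with
  | nil => intro start; rfl
  | cons x t ih =>
    intro start
    show (start, x) :: PySem.List.enumerate t (start + 1) = _
    rw [ih (start + 1), show (x :: t).length = t.length + 1 from rfl, List.range_succ_eq_map,
      List.map_cons, List.map_map]
    congr 1
    · simp
    · apply List.map_congr_left
      intro i _
      simp only [Function.comp_apply, List.getD_cons_succ, Prod.mk.injEq]
      refine ⟨by push_cast; ring, trivial⟩

theorem pv_takeWhile_eq_filter (b : Int) : ∀ (l : List Int), l.Pairwise (· < ·) →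
    l.takeWhile (fun i => decide (i < b)) = l.filter (fun i => decide (i < b)) := by
  intro l
  induction l with
  | nil => intro _; rfl
  | cons a t ih =>
    intro hp
    have hpc := List.pairwise_cons.mp hp
    by_cases hab : a < b
    · rw [List.takeWhile_cons_of_pos (by simpa using hab),
        List.filter_cons_of_pos (by simpa using hab), ih hpc.2]
    · rw [List.takeWhile_cons_of_neg (by simpa using hab),
        List.filter_cons_of_neg (by simpa using hab)]
      rw [eq_comm, List.filter_eq_nil_iff]
      intro x hx
      have := hpc.1 x hx
      simp only [decide_eq_true_eq]
      omega

theorem pv_val_eq (tree : List (Int × List Int)) (i : Nat) (hi : i < tree.length) :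
    pvVal tree i = (tree.map (fun p => p.2)).getD i [] := by
  show (tree.getD i (0, [])).2 = _
  rw [List.getD_eq_getElem _ _ hi,
    List.getD_eq_getElem _ _ (by simpa using hi : i < (tree.map (fun p => p.2)).length),
    List.getElem_map]

-- the endpoint index B builds, read back per endpoint: the (ascending) positions ending at e
theorem pv_byEnd_getD (tree : List (Int × List Int)) (e : Int) :
    ((PySem.List.enumerate (tree.map (fun p => p.2))).foldl
      (fun d q => d.modify ((PySem.List.pyGet? q.2 (-1)).getD 0) [] (fun l => l ++ [q.1]))
      PySem.Dict.empty).getD e []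
    = ((List.range tree.length).filter
        (fun i => (pvVal tree i).getLastD 0 == e)).map (fun (i : Nat) => (i : Int)) := by
  rw [pv_enumerate ([] : List Int) _ 0]
  simp only [List.length_map]
  rw [List.foldl_map]
  rw [PySem.List.foldl_congr_mem (List.range tree.length) _
    (fun d (i : Nat) => d.modify ((pvVal tree i).getLastD 0) [] (fun l => l ++ [(i : Int)]))
    PySem.Dict.empty
    (fun acc i hi => by
      have hin : i < tree.length := List.mem_range.mp hi
      show acc.modify ((PySem.List.pyGet? ((tree.map (fun p => p.2)).getD i []) (-1)).getD 0) []
          (fun l => l ++ [(0 : Int) + (i : Int)]) = _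
      rw [← pv_val_eq tree i hin, pv_pyGetD_neg_one]
      simp only [zero_add])]
  rw [← List.foldl_map (f := fun (i : Nat) => (((pvVal tree i).getLastD 0 : Int), (i : Int)))
    (g := fun (d : PySem.Dict Int (List Int)) (p : Int × Int) => d.modify p.1 [] (fun l => l ++ [p.2]))]
  rw [PySem.Dict.getD_foldl_modify_append]
  rw [List.filter_map, List.map_map]
  simp only [PySem.Dict.getD_empty, List.nil_append]
  exact List.map_congr_left (fun a _ => rfl)

-- the B-side loop invariant: after the first m branches the children dict holds, for every
-- branch, the appenders among positions < m
theorem pv_B_inv (tree : List (Int × List Int))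
    (hnd : (tree.map (fun p => p.1)).Nodup) :
    ∀ m, m ≤ tree.length →
    ((tree.take m).foldl
      (fun d p =>
        if p.1 == 0 then d
        else
          ((((PySem.List.enumerate (tree.map (fun p => p.2))).foldl
              (fun d q => d.modify ((PySem.List.pyGet? q.2 (-1)).getD 0) [] (fun l => l ++ [q.1]))
              PySem.Dict.empty).getD ((PySem.List.pyGet? p.2 0).getD 0) []).takeWhile
            (fun pos => decide (pos < p.1))).foldl
            (fun d2 pos => d2.modify (PySem.List.pyGetD (tree.map (fun p => p.1)) pos 0) []
              (fun c => c ++ [p.1])) d)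
      (tree.foldl (fun d p => d.insert p.1 ([] : List Int)) PySem.Dict.empty)).items
    = (List.range tree.length).map (fun i =>
        (pvKey tree i, ((List.range m).filter (fun j => pvCondB tree i j)).map (pvKey tree))) := by
  intro m
  induction m with
  | zero =>
    intro _
    simp only [List.take_zero, List.foldl_nil, List.range_zero, List.filter_nil, List.map_nil]
    have h0 : tree.foldl (fun d p => d.insert p.1 ([] : List Int)) PySem.Dict.empty
        = (tree.map (fun p => p.1)).foldl (fun d k => d.insert k ([] : List Int)) PySem.Dict.empty := by
      rw [List.foldl_map]
    rw [h0]
    exact pv_children_items tree hnd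
  | succ m ih =>
    intro hm1
    have hmn : m < tree.length := by omega
    rw [List.take_succ_eq_append_getElem hmn, List.foldl_append, List.foldl_cons, List.foldl_nil]
    set st := ((tree.take m).foldl _ _) with hst
    have ihS := ih (by omega)
    have hkeym : tree[m].1 = pvKey tree m := by
      show _ = (tree.getD m (0, [])).1
      rw [List.getD_eq_getElem _ _ hmn]
    have hvalm : tree[m].2 = pvVal tree m := by
      show _ = (tree.getD m (0, [])).2
      rw [List.getD_eq_getElem _ _ hmn]
    have hkeys : st.keys = (List.range tree.length).map (pvKey tree) := by
      show st.items.map (fun p => p.1) = _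
      rw [ihS, List.map_map]
      rfl
    by_cases hz : pvKey tree m = 0
    · rw [hkeym, if_pos (by simpa using hz)]
      rw [ihS]
      apply List.map_congr_left
      intro i hi
      rw [List.range_succ, pv_filter_range_succ]
      have : pvCondB tree i m = false := by
        unfold pvCondB
        simp [hz]
      rw [this]
      simp
    · rw [hkeym, if_neg (by simpa using hz)]
      rw [hvalm, pv_pyGetD_zero, pv_byEnd_getD tree ((pvVal tree m).headD 0)]
      set Sel := (List.range tree.length).filter
        (fun i => (pvVal tree i).getLastD 0 == (pvVal tree m).headD 0) with hSel
      have hSpair : (Sel.map (fun (i : Nat) => (i : Int))).Pairwise (· < ·) := by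
        rw [List.pairwise_map]
        exact (List.pairwise_lt_range.sublist List.filter_sublist).imp
          (fun h => by exact_mod_cast h)
      rw [pv_takeWhile_eq_filter (pvKey tree m) _ hSpair, List.filter_map, List.foldl_map]
      set S' := Sel.filter ((fun pos => decide (pos < pvKey tree m)) ∘ (fun (i : Nat) => (i : Int))) with hS'
      have hS'sub : ∀ j ∈ S', j < tree.length := by
        intro j hj
        have h1 : j ∈ Sel := List.mem_of_mem_filter hj
        have h2 := List.mem_of_mem_filter h1
        exact List.mem_range.mp h2
      rw [PySem.List.foldl_congr_mem S' _
        (fun d2 (j : Nat) => d2.modify (pvKey tree j) [] (fun c => c ++ [pvKey tree m])) st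
        (fun acc j hj => by
          rw [PySem.List.pyGetD_natCast,
            show (tree.map (fun p => p.1)).getD j 0 = pvKey tree j from
              (pv_key_eq tree j (hS'sub j hj)).symm])]
      rw [← List.foldl_map (f := pvKey tree)
        (g := fun (d2 : PySem.Dict Int (List Int)) b => d2.modify b [] (fun c => c ++ [pvKey tree m]))]
      have hS'nodup : S'.Nodup := (List.nodup_range.filter _).filter _
      have hbsnodup : (S'.map (pvKey tree)).Nodup := by
        refine List.Nodup.map_on ?_ hS'nodup
        intro a ha b hb he
        exact pv_key_inj tree hnd (hS'sub a ha) (hS'sub b hb) he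
      rw [pv_fold_modify_items_all (pvKey tree m) (S'.map (pvKey tree)) st
        (hkeys ▸ pv_range_map_key_nodup tree hnd le_rfl) hbsnodup
        (fun b hb => by
          obtain ⟨j, hj, he⟩ := List.mem_map.mp hb
          rw [PySem.Dict.contains_iff_mem_keys, hkeys]
          exact List.mem_map.mpr ⟨j, List.mem_range.mpr (hS'sub j hj), he⟩)]
      rw [ihS, List.map_map]
      apply List.map_congr_left
      intro i hi
      rw [List.mem_range] at hi
      simp only [Function.comp_apply]
      rw [List.range_succ, pv_filter_range_succ]
      have hmemS' : ∀ i, i < tree.length → (i ∈ S' ↔ pvCondB tree i m = true) := by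
        intro i hin
        rw [hS', hSel, List.mem_filter, List.mem_filter, List.mem_range]
        unfold pvCondB
        simp only [Function.comp_apply, Bool.and_eq_true, bne_iff_ne, decide_eq_true_eq]
        constructor
        · rintro ⟨⟨_, hlast⟩, hlt⟩
          exact ⟨⟨hz, hlt⟩, hlast⟩
        · rintro ⟨⟨_, hlt⟩, hlast⟩
          exact ⟨⟨hin, hlast⟩, hlt⟩
      have hmem_iff : pvKey tree i ∈ S'.map (pvKey tree) ↔ pvCondB tree i m = true := by
        rw [← hmemS' i hi]
        constructor
        · intro hmem
          obtain ⟨j, hj, he⟩ := List.mem_map.mp hmem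
          rwa [pv_key_inj tree hnd (hS'sub j hj) hi he] at hj
        · intro hmem
          exact List.mem_map.mpr ⟨i, hmem, rfl⟩
      by_cases hc : pvCondB tree i m = true
      · rw [if_pos (hmem_iff.mpr hc), if_pos hc]
      · rw [if_neg (fun h => hc (hmem_iff.mp h)), if_neg hc]
        simp

theorem pv_B_eq_NFB (tree : List (Int × List Int))
    (hnd : (tree.map (fun p => p.1)).Nodup) :
    get_parent_children_structure_alt tree = pvNFB tree := by
  have h0 := pv_B_inv tree hnd tree.length le_rfl
  rw [List.take_length] at h0
  exact h0

-- under Pre_ and outside D_, A's per-branch test agrees with B's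
theorem pv_cond_eq (tree : List (Int × List Int))
    (hpre : Pre_get_parent_children_structure tree)
    (hnd_ : ¬ D_get_parent_children_structure tree)
    {i j : Nat} (hi : i < tree.length) (hj : j < tree.length) :
    pvCond tree i j = pvCondB tree i j := by
  unfold pvCond pvCondB
  by_cases hz : pvKey tree j = 0
  · simp [hz]
  · have hmatch_iff : (PySem.List.pyGet? (pvVal tree j) 0 == PySem.List.pyGet? (pvVal tree i) (-1))
        = ((pvVal tree i).getLastD 0 == (pvVal tree j).headD 0) := by
      rw [pv_pyGet_zero _ (hpre.2.1 j hj), pv_pyGet_neg_one _ (hpre.2.1 i hi)]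
      by_cases hm : (pvVal tree j).headD 0 = (pvVal tree i).getLastD 0
      · rw [hm]; simp
      · have h1 : (some ((pvVal tree j).headD 0) == some ((pvVal tree i).getLastD 0)) = false := by
          simpa using hm
        have h2 : ((pvVal tree i).getLastD 0 == (pvVal tree j).headD 0) = false := by
          simpa using (Ne.symm hm)
        rw [h1, h2]
    rw [hmatch_iff]
    by_cases hm : ((pvVal tree i).getLastD 0 == (pvVal tree j).headD 0) = true
    · have hopt : PySem.List.pyGet? (pvVal tree j) 0 = PySem.List.pyGet? (pvVal tree i) (-1) := by
        rw [pv_pyGet_zero _ (hpre.2.1 j hj), pv_pyGet_neg_one _ (hpre.2.1 i hi)]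
        simpa [eq_comm] using (beq_iff_eq.mp hm)
      have hiff : i < pvBnd tree.length (pvKey tree j) ↔ (i : Int) < pvKey tree j := by
        by_cases hneg : pvKey tree j < 0
        · constructor
          · intro hb
            exfalso
            apply hnd_
            refine (pv_D_iff tree).mpr ⟨j, hj, hneg, i, hi, hopt, ?_⟩
            have := (pv_bnd_iff tree.length i (pvKey tree j)).mp hb
            rwa [if_pos hneg] at this
          · intro h
            exfalso
            omega
        · rw [pv_bnd_iff, if_neg hneg]
      rw [decide_eq_decide.mpr hiff]
    · have hm' : ((pvVal tree i).getLastD 0 == (pvVal tree j).headD 0) = false :=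
        Bool.eq_false_iff.mpr hm
      rw [hm', Bool.and_false, Bool.and_false]

theorem pv_NF_eq_NFB (tree : List (Int × List Int))
    (hpre : Pre_get_parent_children_structure tree)
    (hnd_ : ¬ D_get_parent_children_structure tree) :
    pvNF tree = pvNFB tree := by
  unfold pvNF pvNFB
  apply List.map_congr_left
  intro i hi
  rw [List.mem_range] at hi
  congr 1
  apply congrArg
  apply List.filter_congr
  intro j hj
  rw [List.mem_range] at hj
  exact pv_cond_eq tree hpre hnd_ hi hj

-- membership of key j in a filtered, key-mapped row decides the filter at j
theorem pv_mem_filter_map (tree : List (Int × List Int))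
    (hnd : (tree.map (fun p => p.1)).Nodup) (q : Nat → Bool) {j : Nat} (hj : j < tree.length) :
    (pvKey tree j ∈ ((List.range tree.length).filter q).map (pvKey tree)) ↔ q j = true := by
  constructor
  · intro hmem
    obtain ⟨j', hj', he⟩ := List.mem_map.mp hmem
    rw [List.mem_filter, List.mem_range] at hj'
    have h2 := hj'.2
    rwa [pv_key_inj tree hnd hj'.1 hj he] at h2
  · intro hq
    exact List.mem_map.mpr ⟨j, List.mem_filter.mpr ⟨List.mem_range.mpr hj, hq⟩, rfl⟩

-- ===== VERDICT (by name: the statements are the Claim_ definitions above) =====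
theorem get_parent_children_structure_spec : Claim_unchanged_get_parent_children_structure := by
  intro tree _ hpre
  unfold Spec_get_parent_children_structure
  intro hnd_
  rw [pv_A_eq_NF tree hpre, pv_B_eq_NFB tree hpre.1, pv_NF_eq_NFB tree hpre hnd_]

theorem get_parent_children_structure_changed : Claim_changed_get_parent_children_structure := by
  unfold Claim_changed_get_parent_children_structure; decide

theorem get_parent_children_structure_tight : Claim_exact_get_parent_children_structure := by
  intro tree _ hpre hd heq
  obtain ⟨j, hj, hneg, i, hi, hopt, hwin⟩ := (pv_D_iff tree).mp hd
  have hnd := hpre.1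
  rw [pv_A_eq_NF tree hpre, pv_B_eq_NFB tree hnd] at heq
  unfold pvNF pvNFB at heq
  have h1 := congrArg (fun l => l[i]?) heq
  simp only [List.getElem?_map, List.getElem?_range hi, Option.map_some] at h1
  have hrows : ((List.range tree.length).filter (fun j => pvCond tree i j)).map (pvKey tree)
      = ((List.range tree.length).filter (fun j => pvCondB tree i j)).map (pvKey tree) :=
    congrArg Prod.snd (Option.some.inj h1)
  have hcA : pvCond tree i j = true := by
    unfold pvCond
    simp only [Bool.and_eq_true, bne_iff_ne, decide_eq_true_eq, beq_iff_eq]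
    refine ⟨⟨by omega, ?_⟩, hopt⟩
    unfold pvBnd
    rw [if_pos hneg]
    omega
  have hmem := (pv_mem_filter_map tree hnd (fun j => pvCond tree i j) hj).mpr hcA
  rw [hrows] at hmem
  have hcB := (pv_mem_filter_map tree hnd (fun j => pvCondB tree i j) hj).mp hmem
  unfold pvCondB at hcB
  simp only [Bool.and_eq_true, decide_eq_true_eq] at hcB
  omega
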